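-- pv_equiv track=rewrite | github.com/nlp-unibuc/clpsych24-task | src/make_GOML_LLM_submission3.py | find_N_spaces_back
-- ===== SOURCE A (Python) =====
-- def find_N_spaces_back(text, position, N):
--     spaces = 0
--     for i in range(position - 1, -1, -1):
--         if text[i] == ' ':
--             spaces += 1
--             if spaces == N:
--                 return i+1
--         # break on end of sentence
--         elif text[i] in {'.', '!', '?'}:
--             return i+1
--     return 0
-- ===== SOURCE B (Python) =====
-- def find_N_spaces_back(text, position, N):
--     end = max(position, 0)
--     punct = max(text.rfind('.', 0, end), text.rfind('!', 0, end), text.rfind('?', 0, end))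
--     idx = end
--     for _ in range(N):
--         idx = text.rfind(' ', punct + 1, idx)
--         if idx == -1:
--             break
--     if N <= 0 or idx == -1:
--         idx = punct
--     return idx + 1
-- ===== Notes on version B (the rewrite author's own statement) =====
-- stated objective: idiomatic
-- what changed: B replaces A's backwards character-by-character scan with str.rfind calls: one rfind per sentence punctuation mark to locate the last boundary before position, then at most N rfind(' ') calls jumping directly from space to space, so per-character work moves into the C-level rfind primitive.
import Mathlib
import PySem

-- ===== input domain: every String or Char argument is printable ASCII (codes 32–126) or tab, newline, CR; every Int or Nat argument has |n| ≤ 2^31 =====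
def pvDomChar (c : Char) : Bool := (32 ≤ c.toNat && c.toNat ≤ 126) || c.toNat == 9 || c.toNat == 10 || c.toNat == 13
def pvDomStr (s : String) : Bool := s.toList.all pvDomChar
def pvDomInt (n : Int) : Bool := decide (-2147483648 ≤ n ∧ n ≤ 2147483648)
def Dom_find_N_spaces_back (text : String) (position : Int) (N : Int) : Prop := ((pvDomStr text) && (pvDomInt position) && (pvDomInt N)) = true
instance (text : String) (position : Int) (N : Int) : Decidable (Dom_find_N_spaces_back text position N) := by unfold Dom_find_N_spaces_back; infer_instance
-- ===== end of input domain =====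

-- B finds the last '.'/'!'/'?' before `position` with rfind, then jumps back over at most N
-- spaces with repeated rfind(' ', punct+1, idx) instead of scanning character by character (idiomatic).

-- ===== PORT A =====
-- the for-loop over range(position-1, -1, -1) with early returns, state `spaces`
def pvLoopA (t : List Char) (N : Int) : List Int → Int → Int
  | [], _ => 0
  | i :: rest, spaces =>
    match PySem.List.pyGet? t i with
    | none => 0   -- IndexError in Python; unreachable under Pre_
    | some c =>
      if c = ' ' then
        if spaces + 1 = N then i + 1 else pvLoopA t N rest (spaces + 1)
      else if c = '.' ∨ c = '!' ∨ c = '?' then i + 1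
      else pvLoopA t N rest spaces

def find_N_spaces_back (text : String) (position : Int) (N : Int) : Int :=
  pvLoopA text.toList N (PySem.List.pyRange (position - 1) (-1) (-1)) 0

-- ===== PORT B =====
-- hand-written port of str.rfind(c, lo, hi): exact for the nonnegative lo/hi B uses
-- (largest index i with lo ≤ i < min(hi, len) and t[i] = c, else -1)
def pvRfindNat (t : List Char) (c : Char) (lo : Nat) : Nat → Int
  | 0 => -1
  | h + 1 => if lo ≤ h ∧ t.getD h ' ' = c then (h : Int) else pvRfindNat t c lo h

def pvRfind (t : List Char) (c : Char) (lo hi : Int) : Int :=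
  pvRfindNat t c lo.toNat (min hi (t.length : Int)).toNat

-- the `for _ in range(N)` loop with `break` (break leaves idx = -1)
def pvLoopB (t : List Char) (punct : Int) : Nat → Int → Int
  | 0, idx => idx
  | k + 1, idx =>
    let j := pvRfind t ' ' (punct + 1) idx
    if j = -1 then -1 else pvLoopB t punct k j

def find_N_spaces_back_alt (text : String) (position : Int) (N : Int) : Int :=
  let t := text.toList
  let e : Int := max position 0
  let punct := max (pvRfind t '.' 0 e) (max (pvRfind t '!' 0 e) (pvRfind t '?' 0 e))
  let idx := pvLoopB t punct N.toNat e
  if N ≤ 0 ∨ idx = -1 then punct + 1 else idx + 1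

-- ===== PRECONDITION & SPEC =====
-- A subscripts text[position-1] first, so it raises IndexError iff position > len(text).
def Pre_find_N_spaces_back (text : String) (position : Int) (N : Int) : Prop :=
  position ≤ (text.toList.length : Int)
instance (text : String) (position : Int) (N : Int) : Decidable (Pre_find_N_spaces_back text position N) := by unfold Pre_find_N_spaces_back; infer_instance

def pvWitness_find_N_spaces_back : String × Int × Int := ("a b. c d", 8, 2)

def Spec_find_N_spaces_back (text : String) (position : Int) (N : Int) (out : Int) : Prop := out = find_N_spaces_back_alt text position N
instance (text : String) (position : Int) (N : Int) (out : Int) : Decidable (Spec_find_N_spaces_back text position N out) := by unfold Spec_find_N_spaces_back; infer_instance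

-- ===== CLAIM (what is proved, stated in full; the proofs are below) =====
def Claim_equal_find_N_spaces_back : Prop := ∀ (text : String) (position : Int) (N : Int), Dom_find_N_spaces_back text position N → Pre_find_N_spaces_back text position N → Spec_find_N_spaces_back text position N (find_N_spaces_back text position N)

-- ===== LEMMAS AND PROOFS =====

-- reference form of A's scan: recursion on the exclusive upper index e, state s = spaces
def pvRef (t : List Char) (N : Int) : Nat → Int → Int
  | 0, _ => 0
  | e + 1, s =>
    if t.getD e ' ' = ' ' then
      if s + 1 = N then (e : Int) + 1 else pvRef t N e (s + 1)
    else if t.getD e ' ' = '.' ∨ t.getD e ' ' = '!' ∨ t.getD e ' ' = '?' then (e : Int) + 1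
    else pvRef t N e s

-- same with a Nat countdown r = (N - s).toNat of spaces still wanted
def pvRef2 (t : List Char) : Nat → Nat → Int
  | 0, _ => 0
  | e + 1, r =>
    if t.getD e ' ' = ' ' then
      if r = 1 then (e : Int) + 1 else pvRef2 t e (r - 1)
    else if t.getD e ' ' = '.' ∨ t.getD e ' ' = '!' ∨ t.getD e ' ' = '?' then (e : Int) + 1
    else pvRef2 t e r

-- B's whole computation with explicit Nat bound e and Nat count k
def pvP (t : List Char) (e : Int) : Int :=
  max (pvRfind t '.' 0 e) (max (pvRfind t '!' 0 e) (pvRfind t '?' 0 e))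

def pvBval (t : List Char) (e : Nat) (k : Nat) : Int :=
  let punct := pvP t (e : Int)
  let idx := pvLoopB t punct k (e : Int)
  if k = 0 ∨ idx = -1 then punct + 1 else idx + 1

theorem pvLoopA_eq_ref (t : List Char) (N : Int) :
    ∀ (e : Nat), e ≤ t.length → ∀ s, pvLoopA t N (PySem.List.pyRange ((e : Int) - 1) (-1) (-1)) s = pvRef t N e s := by
  intro e
  induction e with
  | zero =>
    intro _ s
    rw [show ((0 : Nat) : Int) - 1 = (-1 : Int) by norm_num]
    rw [PySem.List.pyRange_neg_one_eq_nil (by omega)]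
    rfl
  | succ n ih =>
    intro he s
    rw [show (((n+1 : Nat)) : Int) - 1 = (n : Int) by push_cast; ring]
    rw [PySem.List.pyRange_neg_one_cons (by omega)]
    have hg : PySem.List.pyGet? t ((n : Nat) : Int) = some (t.getD n ' ') := by
      rw [PySem.List.pyGet?_natCast, List.getElem?_eq_getElem (by omega),
          List.getD_eq_getElem _ _ (by omega)]
    simp only [pvLoopA, hg, pvRef]
    split_ifs with h1 h2 h3
    · rfl
    · exact ih (by omega) (s + 1)
    · rfl
    · exact ih (by omega) s

theorem pvRfindNat_neg (t : List Char) (c : Char) (lo : Nat) :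
    ∀ h, h ≤ lo → pvRfindNat t c lo h = -1 := by
  intro h
  induction h with
  | zero => intro _; rfl
  | succ n ih =>
    intro hle
    simp only [pvRfindNat]
    rw [if_neg (by omega)]
    exact ih (by omega)

theorem pvRfindNat_bound (t : List Char) (c : Char) (lo : Nat) :
    ∀ h, -1 ≤ pvRfindNat t c lo h ∧ pvRfindNat t c lo h < (h : Int) := by
  intro h
  induction h with
  | zero => simp [pvRfindNat]
  | succ n ih =>
    simp only [pvRfindNat]
    split
    · push_cast; omega
    · push_cast; omega

theorem pvRfind_step (t : List Char) (c : Char) (lo : Int) (e : Nat) (he : e < t.length) :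
    pvRfind t c lo ((e : Int) + 1) =
      if lo.toNat ≤ e ∧ t.getD e ' ' = c then (e : Int) else pvRfind t c lo (e : Int) := by
  unfold pvRfind
  have h1 : (min ((e : Int) + 1) (t.length : Int)).toNat = e + 1 := by omega
  have h2 : (min ((e : Int)) (t.length : Int)).toNat = e := by omega
  rw [h1, h2]
  simp only [pvRfindNat]

theorem pvRfind_bound (t : List Char) (c : Char) (lo : Int) (e : Nat) (he : e ≤ t.length) :
    -1 ≤ pvRfind t c lo (e : Int) ∧ pvRfind t c lo (e : Int) < (e : Int) := by
  unfold pvRfind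
  have h2 : (min ((e : Int)) (t.length : Int)).toNat = e := by omega
  rw [h2]
  exact pvRfindNat_bound t c lo.toNat e

theorem pvP_zero (t : List Char) : pvP t 0 = -1 := by
  unfold pvP pvRfind
  rw [show (min (0 : Int) (t.length : Int)).toNat = 0 by omega]
  rfl

theorem pvP_bound (t : List Char) (e : Nat) (he : e ≤ t.length) :
    -1 ≤ pvP t (e : Int) ∧ pvP t (e : Int) < (e : Int) := by
  have h1 := pvRfind_bound t '.' 0 e he
  have h2 := pvRfind_bound t '!' 0 e he
  have h3 := pvRfind_bound t '?' 0 e he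
  unfold pvP
  omega

theorem pvP_succ (t : List Char) (e : Nat) (he : e < t.length) :
    pvP t ((e : Int) + 1) =
      if t.getD e ' ' = '.' ∨ t.getD e ' ' = '!' ∨ t.getD e ' ' = '?' then (e : Int)
      else pvP t (e : Int) := by
  have h1 := pvRfind_bound t '.' 0 e (by omega)
  have h2 := pvRfind_bound t '!' 0 e (by omega)
  have h3 := pvRfind_bound t '?' 0 e (by omega)
  unfold pvP
  rw [pvRfind_step t '.' 0 e he, pvRfind_step t '!' 0 e he, pvRfind_step t '?' 0 e he]
  rcases eq_or_ne (t.getD e ' ') '.' with hc | hc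
  · rw [if_pos ⟨by omega, hc⟩, if_neg (by rw [hc]; simp), if_neg (by rw [hc]; simp), if_pos (by tauto)]
    omega
  · rw [if_neg (by tauto)]
    rcases eq_or_ne (t.getD e ' ') '!' with hd | hd
    · rw [if_pos ⟨by omega, hd⟩, if_neg (by rw [hd]; simp), if_pos (by tauto)]
      omega
    · rw [if_neg (by tauto)]
      rcases eq_or_ne (t.getD e ' ') '?' with hq | hq
      · rw [if_pos ⟨by omega, hq⟩, if_pos (by tauto)]
        omega
      · rw [if_neg (by tauto), if_neg (by tauto)]

theorem pvBval_eq_ref2 (t : List Char) :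
    ∀ (e : Nat), e ≤ t.length → ∀ k, pvBval t e k = pvRef2 t e k := by
  intro e
  induction e with
  | zero =>
    intro _ k
    have hj : pvRfind t ' ' 0 (0 : Int) = -1 := by
      unfold pvRfind
      rw [show (min ((0 : Int)) (t.length : Int)).toNat = 0 by omega]
      exact pvRfindNat_neg t ' ' _ 0 (by omega)
    cases k with
    | zero => simp [pvBval, pvLoopB, pvRef2, pvP_zero]
    | succ kk => simp [pvBval, pvLoopB, pvRef2, pvP_zero, hj]
  | succ n ih =>
    intro he k
    have hn : n < t.length := by omega
    have hcast : (((n + 1 : Nat)) : Int) = (n : Int) + 1 := by push_cast; ring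
    have hPs := pvP_succ t n hn
    have hPb := pvP_bound t n (by omega)
    by_cases hsp : t.getD n ' ' = ' '
    · -- char at n is a space
      have hpunct : ¬(t.getD n ' ' = '.' ∨ t.getD n ' ' = '!' ∨ t.getD n ' ' = '?') := by
        rw [hsp]; simp
      have hP : pvP t (((n + 1 : Nat)) : Int) = pvP t (n : Int) := by
        rw [hcast, hPs, if_neg hpunct]
      have hj : pvRfind t ' ' (pvP t (n : Int) + 1) (((n + 1 : Nat)) : Int) = (n : Int) := by
        rw [hcast, pvRfind_step t ' ' _ n hn, if_pos ⟨by omega, hsp⟩]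
      have hsp' : t[n]?.getD ' ' = ' ' := hsp
      cases k with
      | zero =>
        simp only [pvRef2]
        rw [if_pos hsp, if_neg (by omega), show (0 - 1 : Nat) = 0 from rfl,
            ← ih (by omega) 0]
        simp only [pvBval, pvLoopB, hP]
        simp
      | succ kk =>
        cases kk with
        | zero =>
          simp only [pvBval, pvLoopB, hP, hj, pvRef2]
          simp [hsp', show ¬((n : Int) = -1) by omega]
        | succ ll =>
          simp only [pvRef2]
          rw [if_pos hsp, if_neg (by omega),
              show (ll + 1 + 1 - 1 : Nat) = ll + 1 from rfl, ← ih (by omega) (ll + 1)]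
          simp only [pvBval, pvLoopB, hP, hj]
          simp [show ¬((n : Int) = -1) by omega]
    · by_cases hpunct : t.getD n ' ' = '.' ∨ t.getD n ' ' = '!' ∨ t.getD n ' ' = '?'
      · -- char at n is sentence punctuation
        have hP : pvP t (((n + 1 : Nat)) : Int) = (n : Int) := by
          rw [hcast, hPs, if_pos hpunct]
        have hsp' : ¬(t[n]?.getD ' ' = ' ') := hsp
        have hpunct' : t[n]?.getD ' ' = '.' ∨ t[n]?.getD ' ' = '!' ∨ t[n]?.getD ' ' = '?' := hpunct
        cases k with
        | zero =>
          simp only [pvBval, pvLoopB, hP, pvRef2]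
          simp [hsp', hpunct']
        | succ kk =>
          have hj : pvRfind t ' ' ((n : Int) + 1) (((n + 1 : Nat)) : Int) = -1 := by
            rw [hcast]
            unfold pvRfind
            rw [show (min ((n : Int) + 1) (t.length : Int)).toNat = n + 1 by omega]
            exact pvRfindNat_neg t ' ' _ _ (by omega)
          simp only [pvBval, pvLoopB, hP, hj, pvRef2]
          simp [hsp', hpunct']
      · -- ordinary character
        have hP : pvP t (((n + 1 : Nat)) : Int) = pvP t (n : Int) := by
          rw [hcast, hPs, if_neg hpunct]
        have hj : pvRfind t ' ' (pvP t (n : Int) + 1) (((n + 1 : Nat)) : Int) =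
            pvRfind t ' ' (pvP t (n : Int) + 1) (n : Int) := by
          rw [hcast, pvRfind_step t ' ' _ n hn, if_neg (fun h => hsp h.2)]
        cases k with
        | zero =>
          simp only [pvRef2]
          rw [if_neg hsp, if_neg hpunct, ← ih (by omega) 0]
          simp only [pvBval, pvLoopB, hP]
          simp
        | succ kk =>
          simp only [pvRef2]
          rw [if_neg hsp, if_neg hpunct, ← ih (by omega) (kk + 1)]
          simp only [pvBval, pvLoopB, hP, hj]

theorem pvRef_eq_ref2 (t : List Char) (N : Int) :
    ∀ (e : Nat) (s : Int), pvRef t N e s = pvRef2 t e (N - s).toNat := by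
  intro e
  induction e with
  | zero => intro s; rfl
  | succ n ih =>
    intro s
    simp only [pvRef, pvRef2]
    split_ifs with h1 h2 h3 h4 h5
    · rfl
    · omega
    · omega
    · rw [ih]; congr 1; omega
    · rfl
    · exact ih s

theorem pvAlt_eq_bval (text : String) (position : Int) (N : Int) :
    find_N_spaces_back_alt text position N = pvBval text.toList position.toNat N.toNat := by
  simp only [find_N_spaces_back_alt, pvBval, pvP]
  rw [show ((position.toNat : Nat) : Int) = max position 0 by omega]
  exact if_congr (or_congr (by omega) Iff.rfl) rfl rfl

-- ===== VERDICT (by name: the statement is the Claim_ definition above) =====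
theorem find_N_spaces_back_spec : Claim_equal_find_N_spaces_back := by
  intro text position N _ hpre
  unfold Pre_find_N_spaces_back at hpre
  unfold Spec_find_N_spaces_back
  rw [pvAlt_eq_bval, pvBval_eq_ref2 _ _ (by omega)]
  have h2 := pvRef_eq_ref2 text.toList N position.toNat 0
  rw [show (N - 0).toNat = N.toNat by omega] at h2
  rw [← h2]
  unfold find_N_spaces_back
  by_cases hp : 0 ≤ position
  · rw [show position - 1 = ((position.toNat : Nat) : Int) - 1 by omega]
    exact pvLoopA_eq_ref _ _ _ (by omega) 0
  · rw [show position.toNat = 0 by omega]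
    rw [PySem.List.pyRange_neg_one_eq_nil (by omega)]
    rfl
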